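-- pv_equiv track=rewrite | github.com/NagahShinawy/problem-solving | pynative/5_strings/ex_18.py | replace_with_hash
-- ===== SOURCE A (Python) =====
-- from string import ascii_letters
--
-- ACCEPTED = ascii_letters + " "
--
-- def replace_with_hash(text):
--     result = ""
--     for char in text:
--         if char in ACCEPTED:
--             result += char
--         else:
--             result += "#"
--     return result
-- ===== SOURCE B (Python) =====
-- import re
--
-- def replace_with_hash(text):
--     # Single regex-engine scan: replace every char that is not an ASCII
--     # letter or a space with '#'. [^A-Za-z ] is the exact complement of
--     # string.ascii_letters + " ".
--     return re.sub(r"[^A-Za-z ]", "#", text)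
-- ===== Notes on version B (the rewrite author's own statement) =====
-- stated objective: idiomatic
-- what changed: Replaced the explicit per-character loop with string accumulation by a single re.sub call whose character class is the exact complement of ACCEPTED (ASCII letters and space).
import Mathlib
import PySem

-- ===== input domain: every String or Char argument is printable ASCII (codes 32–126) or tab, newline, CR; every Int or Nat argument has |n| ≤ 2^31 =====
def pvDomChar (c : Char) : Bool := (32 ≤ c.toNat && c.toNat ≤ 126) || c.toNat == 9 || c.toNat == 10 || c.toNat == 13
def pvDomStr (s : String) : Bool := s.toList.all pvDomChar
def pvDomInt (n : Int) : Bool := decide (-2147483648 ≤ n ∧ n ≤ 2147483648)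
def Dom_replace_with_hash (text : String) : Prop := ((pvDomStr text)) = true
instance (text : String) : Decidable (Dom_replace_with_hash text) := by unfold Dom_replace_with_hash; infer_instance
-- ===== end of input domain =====

-- B replaces A's explicit per-character loop and string accumulator with a single
-- regex substitution re.sub(r"[^A-Za-z ]", "#", text) (idiomatic; same result).


-- ===== PORT A =====
-- ACCEPTED = ascii_letters + " "
def ACCEPTED : String := "abcdefghijklmnopqrstuvwxyzABCDEFGHIJKLMNOPQRSTUVWXYZ "

-- Literal port of A: loop over the characters, appending either the char or '#'
-- to the accumulated result.  The result string is carried as a List Char and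
-- packed with String.mk at the end (exact for Python's string concatenation,
-- since Lean's own String.append is opaque to the kernel).
def replace_with_hash (text : String) : String :=
  String.mk (text.toList.foldl
    (fun result char =>
      if ACCEPTED.toList.contains char then result ++ [char] else result ++ ['#'])
    [])

-- ===== PORT B =====
-- Port of B's re.sub(r"[^A-Za-z ]", "#", text): the regex engine rewrites each
-- character matched by the class complement of [A-Za-z ] to '#'; exactly a map
-- over the characters with that class test.
def replace_with_hash_alt (text : String) : String :=
  String.mk (text.toList.map
    (fun c => if ('A' ≤ c && c ≤ 'Z') || ('a' ≤ c && c ≤ 'z') || c == ' ' then c else '#'))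

-- ===== PRECONDITION & SPEC =====
def Spec_replace_with_hash (text : String) (out : String) : Prop := out = replace_with_hash_alt text
instance (text : String) (out : String) : Decidable (Spec_replace_with_hash text out) := by unfold Spec_replace_with_hash; infer_instance

-- ===== CLAIM (what is proved, stated in full; the proofs are below) =====
def Claim_equal_replace_with_hash : Prop := ∀ (text : String), Dom_replace_with_hash text → Spec_replace_with_hash text (replace_with_hash text)

-- ===== LEMMAS AND PROOFS =====

-- membership in ACCEPTED = "is an ASCII letter or a space"
theorem mem_ACCEPTED (c : Char) :
    (ACCEPTED.toList.contains c)
      = (('A' ≤ c && c ≤ 'Z') || ('a' ≤ c && c ≤ 'z') || c == ' ') := by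
  have hl : ACCEPTED.toList =
      ['a','b','c','d','e','f','g','h','i','j','k','l','m','n','o','p','q','r','s','t','u','v','w','x','y','z','A','B','C','D','E','F','G','H','I','J','K','L','M','N','O','P','Q','R','S','T','U','V','W','X','Y','Z',' '] := by
    decide
  rw [hl]
  rcases c with ⟨v, h⟩
  simp [beq_iff_eq, Char.le_def, Char.ext_iff, UInt32.ext_iff, UInt32.le_iff_toNat_le]
  rw [Bool.eq_iff_iff]
  simp [Char.le_def, Char.ext_iff, UInt32.ext_iff, UInt32.le_iff_toNat_le]
  omega

-- A's accumulator loop equals B's map (generalized over the accumulator)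
theorem foldl_eq_map (l : List Char) (acc : List Char) :
    l.foldl
      (fun result char =>
        if ACCEPTED.toList.contains char then result ++ [char] else result ++ ['#'])
      acc
      = acc ++ l.map
          (fun c => if ('A' ≤ c && c ≤ 'Z') || ('a' ≤ c && c ≤ 'z') || c == ' ' then c else '#') := by
  induction l generalizing acc with
  | nil => simp
  | cons c t ih =>
    rw [List.foldl_cons, List.map_cons]
    have hc : (if ACCEPTED.toList.contains c then acc ++ [c] else acc ++ ['#'])
        = acc ++ [if ('A' ≤ c && c ≤ 'Z') || ('a' ≤ c && c ≤ 'z') || c == ' ' then c else '#'] := by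
      rw [mem_ACCEPTED]; split_ifs <;> rfl
    rw [hc, ih]; simp

-- ===== VERDICT (by name: the statement is the Claim_ definition above) =====
theorem replace_with_hash_spec : Claim_equal_replace_with_hash := by
  intro text _
  unfold Spec_replace_with_hash replace_with_hash replace_with_hash_alt
  rw [foldl_eq_map]
  simp
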